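-- pv_equiv track=rewrite | github.com/corazza/stochastic-reward-machines | src/rl_agents/deepqjirp2/util.py | split_trace
-- ===== SOURCE A (Python) =====
-- def split_trace(labels, rewards):
--     os = labels.count('o')
--     if labels[-1] == 'o':
--         new_traces_n = os
--     else:
--         new_traces_n = os + 1
--
--     new_traces = list()
--     for i in range(0, new_traces_n):
--         new_traces.append(([], []))
--
--     current_new_trace = 0
--     for i in range(0, len(labels)):
--         new_traces[current_new_trace][0].append(labels[i])
--         new_traces[current_new_trace][1].append(rewards[i])
--         if labels[i] == 'o':
--             current_new_trace += 1
--
--     return list(map(lambda x: (tuple(x[0]),tuple(x[1])), new_traces))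
-- ===== SOURCE B (Python) =====
-- def split_trace(labels, rewards):
--     out = []
--     cur_l, cur_r = [], []
--     for l, r in zip(labels, rewards):
--         cur_l.append(l)
--         cur_r.append(r)
--         if l == 'o':
--             out.append((tuple(cur_l), tuple(cur_r)))
--             cur_l, cur_r = [], []
--     if cur_l:
--         out.append((tuple(cur_l), tuple(cur_r)))
--     return out
-- ===== Notes on version B (the rewrite author's own statement) =====
-- stated objective: simpler
-- what changed: B replaces A's two-phase count-'o'/preallocate-buckets scheme with a counter index into mutable buckets by a single zip pass that accumulates the current segment and flushes it on each 'o' marker.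
import Mathlib
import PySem

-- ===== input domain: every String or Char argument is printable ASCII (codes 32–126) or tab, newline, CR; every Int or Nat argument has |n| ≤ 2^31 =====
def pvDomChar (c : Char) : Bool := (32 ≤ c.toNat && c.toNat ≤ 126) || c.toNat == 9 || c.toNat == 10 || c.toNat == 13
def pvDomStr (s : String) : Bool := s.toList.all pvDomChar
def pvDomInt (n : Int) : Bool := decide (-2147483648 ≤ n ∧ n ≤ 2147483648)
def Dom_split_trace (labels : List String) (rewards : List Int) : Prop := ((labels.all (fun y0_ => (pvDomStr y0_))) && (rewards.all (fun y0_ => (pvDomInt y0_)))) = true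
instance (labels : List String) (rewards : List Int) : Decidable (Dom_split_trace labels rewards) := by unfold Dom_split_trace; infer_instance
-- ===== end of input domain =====

-- B replaces A's count/preallocate/counter-indexed bucket filling by a single zip pass that
-- accumulates the current segment and flushes it on each 'o' marker (objective: simpler).

-- ===== PORT A =====
-- one loop iteration of A's main for-loop: append labels[i], rewards[i] to the current bucket,
-- advance the bucket counter on 'o' (Python appends in place; here List.modify on the bucket list)
def pvAStep (labels : List String) (rewards : List Int)
    (st : List (List String × List Int) × Nat) (i : Int) :
    List (List String × List Int) × Nat :=
  let l := PySem.List.pyGetD labels i ""    -- exact under Pre_: 0 ≤ i < len(labels)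
  let r := PySem.List.pyGetD rewards i 0    -- exact under Pre_: len(labels) ≤ len(rewards)
  let tr := st.1.modify st.2 (fun b => (b.1 ++ [l], b.2 ++ [r]))
  (tr, if l = "o" then st.2 + 1 else st.2)

def split_trace (labels : List String) (rewards : List Int) : List (List String × List Int) :=
  let os := PySem.List.count labels "o"
  -- labels[-1]: Python raises IndexError on empty labels; Pre_ excludes that, default "" unused there
  let new_traces_n : Nat := if PySem.List.pyGetD labels (-1) "" = "o" then os else os + 1
  let new_traces := (PySem.List.pyRange 0 (new_traces_n : Int) 1).foldl
    (fun acc _ => acc ++ [(([] : List String), ([] : List Int))]) []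
  -- range(0, len(labels)): indices are the naturals 0..len-1
  let st := (PySem.List.pyRange 0 (labels.length : Int) 1).foldl (pvAStep labels rewards) (new_traces, 0)
  st.1.map (fun x => (x.1, x.2))   -- list(map(lambda x: (tuple(x[0]), tuple(x[1])), …))

-- ===== PORT B =====
-- one iteration of B's zip loop: extend the current segment, flush it when the label is 'o'
def pvBStep (st : List (List String × List Int) × List String × List Int)
    (p : String × Int) : List (List String × List Int) × List String × List Int :=
  let cl := st.2.1 ++ [p.1]
  let cr := st.2.2 ++ [p.2]
  if p.1 = "o" then (st.1 ++ [(cl, cr)], [], []) else (st.1, cl, cr)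

def split_trace_alt (labels : List String) (rewards : List Int) : List (List String × List Int) :=
  let st := (labels.zip rewards).foldl pvBStep ([], [], [])
  if st.2.1 = [] then st.1 else st.1 ++ [(st.2.1, st.2.2)]

-- ===== PRECONDITION & SPEC =====
-- Pre_ excludes exactly the inputs on which A raises IndexError: empty labels (labels[-1]),
-- and rewards shorter than labels (rewards[i] for i < len(labels)).
def Pre_split_trace (labels : List String) (rewards : List Int) : Prop :=
  labels ≠ [] ∧ labels.length ≤ rewards.length
instance (labels : List String) (rewards : List Int) : Decidable (Pre_split_trace labels rewards) := by
  unfold Pre_split_trace; infer_instance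

def pvWitness_split_trace : List String × List Int := (["a", "o", "b"], [1, 2, 3])

def Spec_split_trace (labels : List String) (rewards : List Int) (out : List (List String × List Int)) : Prop := out = split_trace_alt labels rewards
instance (labels : List String) (rewards : List Int) (out : List (List String × List Int)) : Decidable (Spec_split_trace labels rewards out) := by unfold Spec_split_trace; infer_instance

-- ===== CLAIM (what is proved, stated in full; the proofs are below) =====
def Claim_equal_split_trace : Prop := ∀ (labels : List String) (rewards : List Int), Dom_split_trace labels rewards → Pre_split_trace labels rewards → Spec_split_trace labels rewards (split_trace labels rewards)

-- ===== LEMMAS AND PROOFS =====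

-- canonical recursive splitting: both loops compute this
def pvSplitRec : List (String × Int) → List String → List Int → List (List String × List Int)
  | [], cl, cr => if cl = [] then [] else [(cl, cr)]
  | (l, r) :: rest, cl, cr =>
    if l = "o" then (cl ++ [l], cr ++ [r]) :: pvSplitRec rest [] []
    else pvSplitRec rest (cl ++ [l]) (cr ++ [r])

-- number of still-empty buckets beyond the current one that A's loop will use on `rest`
def pvExtra : List (String × Int) → Nat
  | [] => 0
  | (l, _) :: rest => if rest = [] then 0 else (if l = "o" then 1 else 0) + pvExtra rest

-- the buckets beyond the already-finished ones in A's state: current contents, then empties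
def pvPad (rest : List (String × Int)) (cl : List String) (cr : List Int) :
    List (List String × List Int) :=
  match rest with
  | [] => if cl = [] then [] else [(cl, cr)]
  | _ :: _ => (cl, cr) :: List.replicate (pvExtra rest) ([], [])

lemma pvModify_append_length {α : Type} (pre : List α) (a : α) (t : List α) (f : α → α) :
    (pre ++ a :: t).modify pre.length f = pre ++ f a :: t := by
  induction pre with
  | nil => simp [List.modify]
  | cons x xs ih => simpa [List.modify] using ih

-- A's main loop, as a fold over the (label, reward) pairs, with the bucket-list invariant
lemma pvA_loop (rest : List (String × Int)) :
    ∀ (done : List (List String × List Int)) (cl : List String) (cr : List Int),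
    (rest.foldl (fun st p =>
        (st.1.modify st.2 (fun b => (b.1 ++ [p.1], b.2 ++ [p.2])),
         if p.1 = "o" then st.2 + 1 else st.2))
      (done ++ pvPad rest cl cr, done.length)).1 = done ++ pvSplitRec rest cl cr := by
  induction rest with
  | nil =>
    intro done cl cr
    by_cases h : cl = [] <;> simp [pvPad, pvSplitRec, h]
  | cons p rest ih =>
    intro done cl cr
    obtain ⟨l, r⟩ := p
    have hmod : (done ++ pvPad ((l, r) :: rest) cl cr).modify done.length
        (fun b => (b.1 ++ [l], b.2 ++ [r]))
        = done ++ (cl ++ [l], cr ++ [r]) :: List.replicate (pvExtra ((l, r) :: rest)) ([], []) := by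
      simpa [pvPad] using
        pvModify_append_length done (cl, cr) (List.replicate (pvExtra ((l, r) :: rest)) ([], []))
          (fun b => (b.1 ++ [l], b.2 ++ [r]))
    by_cases hl : l = "o"
    · -- flush: current bucket is finished, counter moves on
      subst hl
      have hpad : List.replicate (pvExtra (("o", r) :: rest)) (([] : List String), ([] : List Int))
          = pvPad rest [] [] := by
        cases rest with
        | nil => simp [pvExtra, pvPad]
        | cons q rest' =>
          have he : pvExtra (("o", r) :: q :: rest') = pvExtra (q :: rest') + 1 := by
            simp [pvExtra, Nat.add_comm]
          simp [he, pvPad, List.replicate_succ]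
      rw [List.foldl_cons]
      simp only []
      rw [hmod, hpad]
      simp only [pvSplitRec]
      have hgoal := ih (done ++ [(cl ++ ["o"], cr ++ [r])]) [] []
      simp only [List.length_append, List.length_cons, List.length_nil, List.append_assoc,
        List.cons_append, List.nil_append] at hgoal
      simpa using hgoal
    · -- keep accumulating in the same bucket
      have hpad : ((cl ++ [l], cr ++ [r]) :: List.replicate (pvExtra ((l, r) :: rest)) ([], []))
          = pvPad rest (cl ++ [l]) (cr ++ [r]) := by
        cases rest with
        | nil => simp [pvExtra, pvPad]
        | cons q rest' => simp [pvExtra, pvPad, hl]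
      rw [List.foldl_cons]
      simp only []
      rw [hmod, hpad]
      simp only [pvSplitRec, if_neg hl]
      exact ih done (cl ++ [l]) (cr ++ [r])

-- B's loop with its output accumulator computes the same recursion
lemma pvB_loop (rest : List (String × Int)) :
    ∀ (out : List (List String × List Int)) (cl : List String) (cr : List Int),
    (let s := rest.foldl pvBStep (out, cl, cr)
     if s.2.1 = [] then s.1 else s.1 ++ [(s.2.1, s.2.2)]) = out ++ pvSplitRec rest cl cr := by
  induction rest with
  | nil =>
    intro out cl cr
    by_cases h : cl = [] <;> simp [pvSplitRec, h]
  | cons p rest ih =>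
    intro out cl cr
    obtain ⟨l, r⟩ := p
    by_cases hl : l = "o"
    · simp only [List.foldl_cons, pvBStep, hl, pvSplitRec]
      rw [ih]; simp
    · simp only [List.foldl_cons, pvBStep, pvSplitRec, if_neg hl]
      exact ih out (cl ++ [l]) (cr ++ [r])

-- the constant-append loop that builds A's empty buckets is a replicate
lemma pvFoldl_const_append {α β : Type} (e : α) (L : List β) :
    ∀ (acc : List α), L.foldl (fun acc _ => acc ++ [e]) acc = acc ++ List.replicate L.length e := by
  induction L with
  | nil => simp
  | cons x xs ih => intro acc; simp [ih, List.replicate_succ]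

-- a fold over range(len(labels)) reading labels[i], rewards[i] is a fold over zip(labels, rewards)
lemma pvRange_fold_zip {σ : Type} (g : σ → String → Int → σ) :
    ∀ (la : List String) (ra : List Int) (s : σ), la.length ≤ ra.length →
    (List.range la.length).foldl (fun st k => g st (la.getD k "") (ra.getD k 0)) s
      = (la.zip ra).foldl (fun st p => g st p.1 p.2) s := by
  intro la
  induction la with
  | nil => intro ra s _; simp
  | cons x la ih =>
    intro ra s hlen
    cases ra with
    | nil => simp at hlen
    | cons y ra =>
      simp only [List.length_cons, List.range_succ_eq_map, List.foldl_cons, List.foldl_map,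
        List.getD_cons_zero, List.getD_cons_succ, List.zip_cons_cons]
      exact ih ra (g s x y) (by simpa using hlen)

-- the bucket count A computes equals one more than pvExtra of the pair list
lemma pvExtra_succ (pairs : List (String × Int)) (hne : pairs ≠ []) :
    pvExtra pairs + 1
      = (if (pairs.map Prod.fst).getLast? = some "o"
         then List.count "o" (pairs.map Prod.fst)
         else List.count "o" (pairs.map Prod.fst) + 1) := by
  induction pairs with
  | nil => exact absurd rfl hne
  | cons p rest ih =>
    obtain ⟨l, r⟩ := p
    cases rest with
    | nil =>
      by_cases hl : l = "o" <;> simp [pvExtra, hl]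
    | cons q rest' =>
      have h2 : (q :: rest' : List (String × Int)) ≠ [] := by simp
      have ihr := ih h2
      have hlast : (((l, r) :: q :: rest').map Prod.fst).getLast?
          = ((q :: rest').map Prod.fst).getLast? := by
        simp [List.getLast?_cons_cons]
      have he : pvExtra ((l, r) :: q :: rest')
          = (if l = "o" then 1 else 0) + pvExtra (q :: rest') := by
        simp [pvExtra]
      have hcount : List.count "o" (((l, r) :: q :: rest').map Prod.fst)
          = (if l = "o" then 1 else 0) + List.count "o" ((q :: rest').map Prod.fst) := by
        by_cases hl : l = "o" <;> simp [hl, List.count_cons, Nat.add_comm]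
      rw [he, hlast, hcount]
      by_cases ho : ((q :: rest').map Prod.fst).getLast? = some "o"
      · rw [if_pos ho]; rw [if_pos ho] at ihr; omega
      · rw [if_neg ho]; rw [if_neg ho] at ihr; omega

theorem split_trace_eq (labels : List String) (rewards : List Int)
    (h1 : labels ≠ []) (h2 : labels.length ≤ rewards.length) :
    split_trace labels rewards = split_trace_alt labels rewards := by
  have hzlen : (labels.zip rewards).length = labels.length := by
    simp [List.length_zip]; omega
  have hzne : labels.zip rewards ≠ [] := by
    cases labels with
    | nil => exact absurd rfl h1
    | cons x xs =>
      cases rewards with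
      | nil => simp at h2
      | cons y ys => simp
  have hfst : (labels.zip rewards).map Prod.fst = labels := List.map_fst_zip h2
  -- A's bucket count = pvExtra pairs + 1
  have hlast : PySem.List.pyGetD labels (-1) "" = labels.getLast h1 :=
    PySem.List.pyGetD_neg_one labels "" h1
  have hlast? : labels.getLast? = some (labels.getLast h1) := List.getLast?_eq_some_getLast h1
  have hcount : PySem.List.count labels "o" = List.count "o" labels :=
    PySem.List.count_eq labels "o"
  have hn : (if PySem.List.pyGetD labels (-1) "" = "o"
        then PySem.List.count labels "o" else PySem.List.count labels "o" + 1)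
      = pvExtra (labels.zip rewards) + 1 := by
    rw [pvExtra_succ _ hzne, hfst, hlast, hcount]
    by_cases ho : labels.getLast h1 = "o" <;> simp [ho, hlast?]
  -- unfold A and rewrite its two loops
  unfold split_trace
  simp only [hn]
  -- empty-bucket construction = replicate
  have hbuckets : (PySem.List.pyRange 0 ((pvExtra (labels.zip rewards) + 1 : Nat) : Int) 1).foldl
      (fun acc _ => acc ++ [(([] : List String), ([] : List Int))]) []
      = List.replicate (pvExtra (labels.zip rewards) + 1) ([], []) := by
    rw [PySem.List.pyRange_one, pvFoldl_const_append]
    simp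
  rw [hbuckets]
  -- main loop: pyRange fold → List.range fold → zip fold
  have hmain : (PySem.List.pyRange 0 (labels.length : Int) 1).foldl (pvAStep labels rewards)
        (List.replicate (pvExtra (labels.zip rewards) + 1) ([], []), 0)
      = (labels.zip rewards).foldl (fun st p =>
          (st.1.modify st.2 (fun b => (b.1 ++ [p.1], b.2 ++ [p.2])),
           if p.1 = "o" then st.2 + 1 else st.2))
        (List.replicate (pvExtra (labels.zip rewards) + 1) ([], []), 0) := by
    rw [PySem.List.pyRange_one]
    simp only [List.foldl_map]
    have : ∀ (st : List (List String × List Int) × Nat) (k : Nat),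
        pvAStep labels rewards st ((0 : Int) + k)
          = (st.1.modify st.2 (fun b => (b.1 ++ [labels.getD k ""], b.2 ++ [rewards.getD k 0])),
             if labels.getD k "" = "o" then st.2 + 1 else st.2) := by
      intro st k
      simp [pvAStep, PySem.List.pyGetD_natCast]
    simp only [this]
    rw [show ((labels.length : Int) - 0).toNat = labels.length by simp]
    exact pvRange_fold_zip
      (fun (st : List (List String × List Int) × Nat) l r => (st.1.modify st.2 (fun b => (b.1 ++ [l], b.2 ++ [r])),
        if l = "o" then st.2 + 1 else st.2)) labels rewards _ h2
  rw [hmain]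
  -- invariant: replicate (extra+1) = pvPad pairs [] [] with done = []
  have hpad0 : List.replicate (pvExtra (labels.zip rewards) + 1)
      (([] : List String), ([] : List Int)) = pvPad (labels.zip rewards) [] [] := by
    cases hz : labels.zip rewards with
    | nil => exact absurd hz hzne
    | cons q t => simp [pvPad, List.replicate_succ, ← hz]
  have hA := pvA_loop (labels.zip rewards) [] [] []
  simp only [List.nil_append, List.length_nil] at hA
  rw [hpad0] at *
  rw [hA]
  -- B side
  have hB := pvB_loop (labels.zip rewards) [] [] []
  simp only [List.nil_append] at hB
  unfold split_trace_alt
  rw [← hB]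
  simp

-- ===== VERDICT (by name: the statement is the Claim_ definition above) =====
theorem split_trace_spec : Claim_equal_split_trace := by
  intro labels rewards _ hpre
  exact split_trace_eq labels rewards hpre.1 hpre.2
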